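-- pv_equiv track=rewrite | github.com/aversionq/Innopolis-uni-tasks | lab3/some_task3.py | is_string_intersection
-- ===== SOURCE A (Python) =====
-- def is_string_intersection(str1 : str, str2 : str) -> bool:
--     str1_dict = dict.fromkeys(set(str1), 0)
--     str2_dict = dict.fromkeys(set(str2), 0)
--     for letter in str1:
--         str1_dict[letter] += 1
--     for letter in str2:
--         str2_dict[letter] += 1
--
--     if set(str1).intersection(set(str2)) == set(str2):
--         for i in str2:
--             if str1_dict[i] < str2_dict[i]:
--                 return False
--         return True
--
--     return False
-- ===== SOURCE B (Python) =====
-- def is_string_intersection(str1 : str, str2 : str) -> bool: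
--     return all(
--         sum(1 for x in str1 if x == c) >= sum(1 for x in str2 if x == c)
--         for c in dict.fromkeys(str2)
--     )
-- ===== Notes on version B (the rewrite author's own statement) =====
-- stated objective: simpler
-- what changed: Replaces A's two count dictionaries plus a set-intersection equality test and an early-return comparison loop with a single all(...) over the distinct characters of str2, counting each character by a direct scan (the missing-character case falls out of the count comparison, so no set check is needed).
import Mathlib
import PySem

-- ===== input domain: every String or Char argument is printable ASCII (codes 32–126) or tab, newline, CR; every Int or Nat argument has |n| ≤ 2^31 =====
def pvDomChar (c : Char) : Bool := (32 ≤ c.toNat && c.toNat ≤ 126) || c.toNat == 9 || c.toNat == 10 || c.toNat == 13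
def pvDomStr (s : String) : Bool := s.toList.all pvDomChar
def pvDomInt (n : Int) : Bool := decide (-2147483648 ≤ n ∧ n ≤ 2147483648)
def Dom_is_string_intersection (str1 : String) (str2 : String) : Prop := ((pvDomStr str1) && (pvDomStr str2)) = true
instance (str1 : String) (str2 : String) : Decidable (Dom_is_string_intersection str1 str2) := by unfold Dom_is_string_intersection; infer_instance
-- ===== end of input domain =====

-- B replaces A's count dictionaries, set-intersection equality test and early-return
-- comparison loop by one all(...) over the distinct characters of str2 with per-character
-- counting scans (objective: simpler).

-- ===== PORT A =====
-- the 'for i in str2: if d1[i] < d2[i]: return False' loop, with its early return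
def pvLoopA (d1 d2 : PySem.Dict Char Int) : List Char → Bool
  | [] => true
  | c :: rest => if d1.getD c 0 < d2.getD c 0 then false else pvLoopA d1 d2 rest

def is_string_intersection (str1 : String) (str2 : String) : Bool :=
  let s1 : PySem.Set Char := PySem.Set.ofList str1.toList
  let s2 : PySem.Set Char := PySem.Set.ofList str2.toList
  -- dict.fromkeys(set(strk), 0); the dicts are only looked up afterwards, so set order is immaterial
  let str1_dict0 := s1.foldl (fun d c => PySem.Dict.insert d c (0:Int)) PySem.Dict.empty
  let str2_dict0 := s2.foldl (fun d c => PySem.Dict.insert d c (0:Int)) PySem.Dict.empty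
  let str1_dict := str1.toList.foldl (fun d c => PySem.Dict.modify d c 0 (· + 1)) str1_dict0
  let str2_dict := str2.toList.foldl (fun d c => PySem.Dict.modify d c 0 (· + 1)) str2_dict0
  if PySem.Set.equal (PySem.Set.inter s1 s2) s2 then pvLoopA str1_dict str2_dict str2.toList
  else false

-- ===== PORT B =====
def is_string_intersection_alt (str1 : String) (str2 : String) : Bool :=
  (PySem.List.dedup str2.toList).all (fun c =>
    str2.toList.foldl (fun n x => if x == c then n + 1 else n) (0:Int)
      ≤ str1.toList.foldl (fun n x => if x == c then n + 1 else n) (0:Int))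

-- ===== PRECONDITION & SPEC =====
def Spec_is_string_intersection (str1 : String) (str2 : String) (out : Bool) : Prop := out = is_string_intersection_alt str1 str2
instance (str1 : String) (str2 : String) (out : Bool) : Decidable (Spec_is_string_intersection str1 str2 out) := by unfold Spec_is_string_intersection; infer_instance

-- ===== CLAIM (what is proved, stated in full; the proofs are below) =====
def Claim_equal_is_string_intersection : Prop := ∀ (str1 : String) (str2 : String), Dom_is_string_intersection str1 str2 → Spec_is_string_intersection str1 str2 (is_string_intersection str1 str2)

-- ===== LEMMAS AND PROOFS =====

-- dict.fromkeys(…, 0) looks up as the constant 0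
theorem pv_getD_fromkeys_zero' (l : List Char) (c : Char) (d : PySem.Dict Char Int)
    (hd : d.getD c 0 = 0) :
    (l.foldl (fun d x => PySem.Dict.insert d x (0:Int)) d).getD c 0 = 0 := by
  induction l generalizing d with
  | nil => exact hd
  | cons x rest ih =>
    exact ih _ (by rw [PySem.Dict.getD_insert]; split_ifs <;> simp [hd])

theorem pv_getD_fromkeys_zero (l : List Char) (c : Char) :
    (l.foldl (fun d x => PySem.Dict.insert d x (0:Int)) PySem.Dict.empty).getD c 0 = 0 := by
  exact pv_getD_fromkeys_zero' l c _ (by simp [pysem])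

-- the early-return loop is an 'all'
theorem pvLoopA_eq_all (d1 d2 : PySem.Dict Char Int) (l : List Char) :
    pvLoopA d1 d2 l = l.all (fun c => !(d1.getD c 0 < d2.getD c 0)) := by
  induction l with
  | nil => rfl
  | cons c rest ih =>
    simp only [pvLoopA, List.all_cons, ih]
    split_ifs with h <;> simp [h]

-- B's per-character scan is a count comparison
theorem pv_alt_eq_all (str1 str2 : String) :
    is_string_intersection_alt str1 str2
      = (PySem.List.dedup str2.toList).all
          (fun c => (str2.toList.count c : Int) ≤ (str1.toList.count c : Int)) := by
  unfold is_string_intersection_alt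
  simp only [PySem.List.foldl_beq_add_one, zero_add]

theorem is_string_intersection_spec0 (str1 str2 : String) :
    is_string_intersection str1 str2 = is_string_intersection_alt str1 str2 := by
  rw [pv_alt_eq_all]
  unfold is_string_intersection
  simp only [pvLoopA_eq_all]
  have hget : ∀ (s : String) (c : Char),
      ((s.toList.foldl (fun d c => PySem.Dict.modify d c 0 (· + 1))
        ((PySem.Set.ofList s.toList).foldl (fun d c => PySem.Dict.insert d c (0:Int))
          PySem.Dict.empty)).getD c 0) = (s.toList.count c : Int) := by
    intro s c
    rw [PySem.Dict.getD_foldl_modify_add_one, pv_getD_fromkeys_zero, zero_add]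
  by_cases h : PySem.Set.equal
      (PySem.Set.inter (PySem.Set.ofList str1.toList) (PySem.Set.ofList str2.toList))
      (PySem.Set.ofList str2.toList) = true
  · rw [if_pos h]
    simp only [hget]
    rw [Bool.eq_iff_iff]
    simp only [List.all_eq_true, PySem.List.mem_dedup, decide_eq_true_eq,
      Bool.not_eq_eq_eq_not, Bool.not_true, decide_eq_false_iff_not, Int.not_lt]
  · rw [if_neg h]
    -- some character of str2 is absent from str1, so B's count comparison fails there
    rw [PySem.Set.equal_iff] at h
    push Not at h
    obtain ⟨c, hc⟩ := h
    have hc2 : c ∈ str2.toList ∧ c ∉ str1.toList := by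
      simp only [PySem.Set.mem_inter, PySem.Set.mem_ofList] at hc
      tauto
    symm
    rw [List.all_eq_false]
    refine ⟨c, (PySem.List.mem_dedup _ _).mpr hc2.1, ?_⟩
    have h1 : str1.toList.count c = 0 := List.count_eq_zero.mpr hc2.2
    have h2 : 0 < str2.toList.count c := List.count_pos_iff.mpr hc2.1
    simp only [h1, decide_eq_true_eq, Nat.cast_zero]
    omega

-- ===== VERDICT (by name: the statement is the Claim_ definition above) =====
theorem is_string_intersection_spec : Claim_equal_is_string_intersection := by
  intro str1 str2 _
  exact is_string_intersection_spec0 str1 str2
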